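-- pv_equiv track=rewrite | github.com/LeoKlen/Test | DZ_2/6kyu_3.py | has_subpattern
-- ===== SOURCE A (Python) =====
-- import math
--
-- def has_subpattern(string):
--     dick = []
--     dickQty = []
--     for i in string:
--         if dick.count(i) == 0:
--             dick.append(i)
--             dickQty.append(string.count(i))
--
--     gcd = math.gcd(*dickQty)
--     if(gcd>1):
--         return True
--     else:
--         return False
-- ===== SOURCE B (Python) =====
-- def has_subpattern(string):
--     counts = {}
--     for c in string:
--         counts[c] = counts.get(c, 0) + 1
--     vals = list(counts.values())
--     if not vals:
--         return False
--     m = max(vals)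
--     for d in range(2, m + 1):
--         if all(v % d == 0 for v in vals):
--             return True
--     return False
-- ===== Notes on version B (the rewrite author's own statement) =====
-- stated objective: alternative
-- what changed: A builds the distinct-character list with quadratic list.count/str.count scans and returns math.gcd(*frequencies) > 1; B builds frequencies in one dict pass and searches d = 2..max(frequencies) by trial division for a divisor of every frequency, never computing a gcd.
import Mathlib
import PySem

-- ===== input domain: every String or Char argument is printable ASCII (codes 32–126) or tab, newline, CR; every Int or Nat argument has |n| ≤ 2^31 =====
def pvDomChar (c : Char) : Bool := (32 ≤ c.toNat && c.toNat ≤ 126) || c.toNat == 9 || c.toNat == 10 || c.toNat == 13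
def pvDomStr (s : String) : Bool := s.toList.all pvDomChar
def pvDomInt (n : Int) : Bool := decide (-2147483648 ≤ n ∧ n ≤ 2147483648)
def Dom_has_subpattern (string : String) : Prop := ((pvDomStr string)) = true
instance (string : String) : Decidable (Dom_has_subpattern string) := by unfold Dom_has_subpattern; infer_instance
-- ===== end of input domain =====

-- B replaces A's gcd-of-character-frequencies test by a trial-division search for a
-- common divisor d = 2 .. max(frequencies) (objective: alternative; same return value).

-- ===== PORT A =====
-- A: collect distinct characters and their frequencies, then return math.gcd(*freqs) > 1
-- (math.gcd of no arguments is 0).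
def has_subpattern (string : String) : Bool :=
  let pair := string.toList.foldl
    (fun (acc : List Char × List Nat) i =>
      if PySem.List.count acc.1 i == 0 then
        (acc.1 ++ [i], acc.2 ++ [PySem.Str.count string (String.ofList [i])])
      else acc) ([], [])
  let gcd := pair.2.foldl Nat.gcd 0
  if gcd > 1 then true else false

-- ===== PORT B =====
-- B: one Counter pass, then search d = 2 .. max(vals) for a d dividing every frequency.
def has_subpattern_alt (string : String) : Bool :=
  let counts := string.toList.foldl
    (fun (d : PySem.Dict Char Int) c => d.insert c (d.getD c 0 + 1)) PySem.Dict.empty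
  let vals := counts.values
  if vals.isEmpty then false
  else
    match PySem.List.max? vals (fun v => v) with
    | none => false
    | some m =>
      (PySem.List.pyRange 2 (m + 1) 1).any
        (fun d => vals.all (fun v => PySem.Int.mod v d == 0))

-- ===== PRECONDITION & SPEC =====
def Spec_has_subpattern (string : String) (out : Bool) : Prop := out = has_subpattern_alt string
instance (string : String) (out : Bool) : Decidable (Spec_has_subpattern string out) := by unfold Spec_has_subpattern; infer_instance

-- ===== CLAIM (what is proved, stated in full; the proofs are below) =====
def Claim_equal_has_subpattern : Prop := ∀ (string : String), Dom_has_subpattern string → Spec_has_subpattern string (has_subpattern string)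

-- ===== LEMMAS AND PROOFS =====

-- Python's s.count(c) for a one-character needle is the element count of c in s.
lemma count_go_singleton (c : Char) (s : List Char) (fuel acc : Nat) (h : s.length ≤ fuel) :
    PySem.Chars.count.go [c] fuel s acc = acc + s.count c := by
  induction s generalizing fuel acc with
  | nil => cases fuel <;> simp [PySem.Chars.count.go]
  | cons x t ih =>
    cases fuel with
    | zero => simp at h
    | succ n =>
      simp only [List.length_cons, Nat.add_le_add_iff_right] at h
      rw [PySem.Chars.count.go]
      by_cases hc : c = x
      · subst hc
        simp [List.isPrefixOf, ih n (acc + 1) h]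
        omega
      · simp [List.isPrefixOf, hc, ih n acc h, Ne.symm hc]

lemma chars_count_singleton (cs : List Char) (c : Char) :
    PySem.Chars.count cs [c] = cs.count c := by
  simp [PySem.Chars.count, count_go_singleton c cs cs.length 0 le_rfl]

-- A's loop invariant: the pair (dick, dickQty) stays of the form (S, S.map f),
-- and dick grows exactly like Python's set(...) in first-insertion order.
lemma foldA_inv (f : Char → Nat) (l s : List Char) :
    l.foldl
      (fun (acc : List Char × List Nat) i =>
        if PySem.List.count acc.1 i == 0 then (acc.1 ++ [i], acc.2 ++ [f i]) else acc)
      (s, s.map f)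
    = (l.foldl PySem.Set.add s, (l.foldl PySem.Set.add s).map f) := by
  induction l generalizing s with
  | nil => simp
  | cons x t ih =>
    simp only [List.foldl_cons]
    by_cases hx : x ∈ s
    · have h1 : (PySem.List.count s x == 0) = false := by
        simp [PySem.List.count_eq, List.count_eq_zero, hx]
      have h2 : PySem.Set.add s x = s := by simp [PySem.Set.add, hx]
      rw [h2]
      simp only [h1, Bool.false_eq_true, if_false]
      exact ih s
    · have h1 : (PySem.List.count s x == 0) = true := by
        simp [PySem.List.count_eq, List.count_eq_zero, hx]
      have h2 : PySem.Set.add s x = s ++ [x] := by simp [PySem.Set.add, hx]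
      rw [h2]
      simp only [h1, if_true]
      have h3 := ih (s ++ [x])
      simp only [List.map_append, List.map_cons, List.map_nil] at h3
      exact h3

-- folding gcd over a list
lemma foldl_gcd_dvd_init (K : List Nat) (a : Nat) : K.foldl Nat.gcd a ∣ a := by
  induction K generalizing a with
  | nil => simp
  | cons z u ihu => exact dvd_trans (ihu _) (Nat.gcd_dvd_left a z)

lemma foldl_gcd_dvd_mem (K : List Nat) : ∀ (a : Nat), ∀ x ∈ K, K.foldl Nat.gcd a ∣ x := by
  induction K with
  | nil => simp
  | cons y t ih =>
    intro a x hx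
    simp only [List.foldl_cons]
    rcases (List.mem_cons).1 hx with h | h
    · subst h
      exact dvd_trans (foldl_gcd_dvd_init t _) (Nat.gcd_dvd_right a x)
    · exact ih _ x h

lemma dvd_foldl_gcd (K : List Nat) : ∀ (a d : Nat), d ∣ a → (∀ x ∈ K, d ∣ x) → d ∣ K.foldl Nat.gcd a := by
  induction K with
  | nil => intro a d ha _; simpa using ha
  | cons y t ih =>
    intro a d ha h
    simp only [List.foldl_cons]
    exact ih _ d (Nat.dvd_gcd ha (h y (by simp))) (fun x hx => h x (by simp [hx]))

-- the core fact: for positive counts, gcd > 1 iff some d in 2 .. max divides them all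
lemma gcd_trial (K : List Nat) (hpos : ∀ x ∈ K, 0 < x) :
    (if 1 < K.foldl Nat.gcd 0 then true else false)
    = (if (K.map (fun n : Nat => (n : Int))).isEmpty then false
       else
         match PySem.List.max? (K.map (fun n : Nat => (n : Int))) (fun v => v) with
         | none => false
         | some m =>
           (PySem.List.pyRange 2 (m + 1) 1).any
             (fun d => (K.map (fun n : Nat => (n : Int))).all (fun v => PySem.Int.mod v d == 0))) := by
  cases K with
  | nil => simp
  | cons v t =>
    have hg := foldl_gcd_dvd_mem (v :: t) 0
    set g := (v :: t).foldl Nat.gcd 0 with hgdef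
    have hv : 0 < v := hpos v (by simp)
    have hg0 : 0 < g := by
      rcases Nat.eq_zero_or_pos g with h | h
      · have h2 := hg v (by simp)
        rw [h] at h2
        exact absurd (Nat.eq_zero_of_zero_dvd h2) (by omega)
      · exact h
    have hmapcons : (v :: t).map (fun n : Nat => (n : Int)) = (v : Int) :: t.map (fun n : Nat => (n : Int)) := rfl
    rw [hmapcons]
    have hm := PySem.List.max?_id_cons (v : Int) (t.map (fun n : Nat => (n : Int)))
    rw [hm]
    set m := List.foldl max (v : Int) (t.map (fun n : Nat => (n : Int))) with hmdef
    simp only [List.isEmpty_cons, Bool.false_eq_true, if_false]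
    have hmem : m ∈ (v : Int) :: t.map (fun n : Nat => (n : Int)) := PySem.List.max?_mem hm
    have hmax : ∀ y ∈ (v : Int) :: t.map (fun n : Nat => (n : Int)), y ≤ m :=
      fun y hy => PySem.List.max?_isMax hm y hy
    rw [← hmapcons] at hmem hmax
    by_cases h1 : 1 < g
    · rw [if_pos h1]
      symm
      rw [List.any_eq_true]
      refine ⟨(g : Int), ?_, ?_⟩
      · rw [PySem.List.mem_pyRange_one]
        constructor
        · exact_mod_cast h1
        · rcases List.mem_map.1 hmem with ⟨x0, hx0, hx0e⟩
          have hgx : g ∣ x0 := hg x0 hx0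
          have hx0p : 0 < x0 := hpos x0 hx0
          have hle : g ≤ x0 := Nat.le_of_dvd hx0p hgx
          have : (g : Int) ≤ m := by rw [← hx0e]; exact_mod_cast hle
          omega
      · rw [List.all_eq_true]
        intro w hw
        rw [← hmapcons] at hw
        rcases List.mem_map.1 hw with ⟨x0, hx0, hx0e⟩
        rw [beq_iff_eq, PySem.Int.mod_eq_zero_iff_dvd, ← hx0e]
        exact_mod_cast hg x0 hx0
    · rw [if_neg h1]
      symm
      rw [List.any_eq_false]
      intro d hd
      rw [PySem.List.mem_pyRange_one] at hd
      intro hall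
      rw [List.all_eq_true] at hall
      have hdn : d = ((d.toNat : Nat) : Int) := by omega
      have hdvd : ∀ x ∈ v :: t, d.toNat ∣ x := by
        intro x hx
        have hw := hall ((x : Nat) : Int) (by rw [← hmapcons]; exact List.mem_map.2 ⟨x, hx, rfl⟩)
        rw [beq_iff_eq, PySem.Int.mod_eq_zero_iff_dvd, hdn] at hw
        exact_mod_cast hw
      have hdg : d.toNat ∣ g := dvd_foldl_gcd (v :: t) 0 d.toNat (dvd_zero _) hdvd
      have : d.toNat ≤ g := Nat.le_of_dvd hg0 hdg
      omega

-- ===== VERDICT (by name: the statement is the Claim_ definition above) =====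
theorem has_subpattern_spec : Claim_equal_has_subpattern := by
  intro string _
  unfold Spec_has_subpattern has_subpattern has_subpattern_alt
  have hcnt : ∀ i : Char, PySem.Str.count string (String.ofList [i]) = string.toList.count i := by
    intro i
    rw [PySem.Str.count_eq, String.toList_ofList, chars_count_singleton]
  simp only [hcnt]
  rw [show (([], []) : List Char × List Nat) =
      (([] : List Char), ([] : List Char).map (fun i => string.toList.count i)) from rfl]
  rw [foldA_inv (fun i => string.toList.count i) string.toList []]
  rw [← PySem.Set.ofList_eq_foldl]
  rw [PySem.Dict.foldl_insert_getD_add_one_eq_counter]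
  have hvals : (PySem.Dict.counter string.toList).values
      = ((PySem.Set.ofList string.toList).map (fun i => string.toList.count i)).map
          (fun n : Nat => (n : Int)) := by
    show (PySem.Dict.counter string.toList).items.map (fun p => p.2) = _
    rw [PySem.Dict.items_counter, List.map_map, List.map_map]
    rfl
  rw [hvals]
  exact gcd_trial _ (fun x hx => by
    rcases List.mem_map.1 hx with ⟨k, hk, he⟩
    have : k ∈ string.toList := (PySem.Set.mem_ofList _ _).1 hk
    rw [← he]
    simpa [List.count_pos_iff] using this)
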